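-- pv_equiv track=rewrite | github.com/Matteo299/ConnectM | connect_m.py | anti_diag_check
-- ===== SOURCE A (Python) =====
-- def find_lower_bound(x,m) :
--     if x-m<0 :
--         return x
--     else :
--         return m-1
--
-- def find_upper_bound(x,m,n) :
--     if x+m>=n :
--         return n-1-x
--     else :
--         return m-1
--
-- def anti_diag_check(grid,n,m,row,col,symbol) :
--
--     lbr = find_upper_bound(row,m,n)
--     lbc = find_lower_bound(col,m)
--
--     # This (negative) value is the number of cells left to the current
--     # in the anti-diagonal that can lead to a goal state.
--     lb = - min(lbr,lbc)
--
--     ubr = find_lower_bound(row,m)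
--     ubc = find_upper_bound(col,m,n)
--
--     # This value is the number of cells right to the current
--     # in the anti-diagonal that can lead to a goal state.
--     ub = min(ubr,ubc)
--     count = 0
--
--     for i in range(lb,ub+1) :
--         if grid[row-i][col+i] == symbol :
--             count = count+1
--             # If m consecutive cells has the same symbol then it's a goal.
--             if count == m :
--                 return True
--         else :
--             count = 0
--     return False
-- ===== SOURCE B (Python) =====
-- def find_lower_bound(x,m) :
--     if x-m<0 :
--         return x
--     else :
--         return m-1
--
-- def find_upper_bound(x,m,n) :
--     if x+m>=n :
--         return n-1-x
--     else :
--         return m-1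
--
-- def anti_diag_check(grid,n,m,row,col,symbol) :
--     lb = - min(find_upper_bound(row,m,n), find_lower_bound(col,m))
--     ub = min(find_lower_bound(row,m), find_upper_bound(col,m,n))
--     # gather the anti-diagonal window first, then look for a full window of m matches
--     seq = [grid[row-i][col+i] for i in range(lb, ub+1)]
--     if m < 1 :
--         return False
--     return any(all(c == symbol for c in seq[j:j+m])
--                for j in range(len(seq)-m+1))
-- ===== Notes on version B (the rewrite author's own statement) =====
-- stated objective: alternative
-- what changed: A's single fused scan with a running consecutive-match counter and early return is replaced by gathering the anti-diagonal window into a list first and then checking, by a sliding any/all window test, whether some m-length window consists entirely of the symbol. Pre_ excludes inputs whose scanned anti-diagonal window contains an out-of-range cell, where Python raises IndexError; A can still return True early there if a run of m completes before the bad cell, while B, which gathers the whole window first, raises.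
import Mathlib
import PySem

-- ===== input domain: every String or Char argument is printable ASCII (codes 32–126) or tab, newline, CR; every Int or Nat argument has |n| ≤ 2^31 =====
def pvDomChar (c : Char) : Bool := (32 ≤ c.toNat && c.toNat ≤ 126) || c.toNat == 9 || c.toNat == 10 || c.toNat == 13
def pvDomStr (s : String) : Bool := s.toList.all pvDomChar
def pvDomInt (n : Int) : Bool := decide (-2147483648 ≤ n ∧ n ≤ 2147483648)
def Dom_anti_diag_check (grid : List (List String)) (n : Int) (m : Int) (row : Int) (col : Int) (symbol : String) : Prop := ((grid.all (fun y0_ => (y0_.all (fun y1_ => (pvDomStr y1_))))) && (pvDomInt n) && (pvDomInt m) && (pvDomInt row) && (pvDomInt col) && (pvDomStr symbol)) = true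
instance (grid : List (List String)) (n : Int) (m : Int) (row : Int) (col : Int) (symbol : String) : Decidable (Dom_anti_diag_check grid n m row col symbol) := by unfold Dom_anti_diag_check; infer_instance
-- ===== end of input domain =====

-- B gathers the anti-diagonal window into a list and tests m-length sliding windows
-- with any/all, instead of A's fused running-count scan with early return (objective: alternative).
-- Pre_ excludes inputs whose scanned window contains an out-of-range cell: Python A raises
-- IndexError there (or returns True early before reaching the bad cell), and B raises.


-- ===== PORT A =====
def find_lower_bound (x m : Int) : Int :=
  if x - m < 0 then x else m - 1

def find_upper_bound (x m n : Int) : Int :=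
  if x + m ≥ n then n - 1 - x else m - 1

-- grid[row-i][col+i]; `none` (IndexError in Python) is mapped to "" — unreachable under Pre_
def adcCell (grid : List (List String)) (row col i : Int) : String :=
  match PySem.List.pyGet? grid (row - i) with
  | none => ""
  | some r => (PySem.List.pyGet? r (col + i)).getD ""

-- A's `for i in range(lb, ub+1)` loop with the running count and early return
def adcLoop (grid : List (List String)) (row col m : Int) (symbol : String) :
    List Int → Int → Bool
  | [], _ => false
  | i :: rest, count =>
    if adcCell grid row col i == symbol then
      if count + 1 == m then true
      else adcLoop grid row col m symbol rest (count + 1)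
    else adcLoop grid row col m symbol rest 0

def anti_diag_check (grid : List (List String)) (n : Int) (m : Int) (row : Int) (col : Int) (symbol : String) : Bool :=
  let lbr := find_upper_bound row m n
  let lbc := find_lower_bound col m
  let lb := -(min lbr lbc)
  let ubr := find_lower_bound row m
  let ubc := find_upper_bound col m n
  let ub := min ubr ubc
  adcLoop grid row col m symbol (PySem.List.pyRange lb (ub + 1) 1) 0

-- ===== PORT B =====
def anti_diag_check_alt (grid : List (List String)) (n : Int) (m : Int) (row : Int) (col : Int) (symbol : String) : Bool :=
  let lb := -(min (find_upper_bound row m n) (find_lower_bound col m))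
  let ub := min (find_lower_bound row m) (find_upper_bound col m n)
  let seq := (PySem.List.pyRange lb (ub + 1) 1).map (fun i => adcCell grid row col i)
  if m < 1 then false
  else (PySem.List.pyRange 0 ((seq.length : Int) - m + 1) 1).any
        (fun j => (PySem.List.slice seq (some j) (some (j + m))).all (fun c => c == symbol))

-- ===== PRECONDITION & SPEC =====
-- Pre_ excludes exactly the inputs whose scanned window touches an out-of-range cell:
-- there Python raises IndexError (A may still return True early if a run of m completes
-- before the bad cell; B, which gathers the whole window first, raises).
def Pre_anti_diag_check (grid : List (List String)) (n : Int) (m : Int) (row : Int) (col : Int) (symbol : String) : Prop :=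
  ((PySem.List.pyRange (-(min (find_upper_bound row m n) (find_lower_bound col m)))
      ((min (find_lower_bound row m) (find_upper_bound col m n)) + 1) 1).all
    (fun i => match PySem.List.pyGet? grid (row - i) with
      | none => false
      | some r => (PySem.List.pyGet? r (col + i)).isSome)) = true

instance (grid : List (List String)) (n : Int) (m : Int) (row : Int) (col : Int) (symbol : String) : Decidable (Pre_anti_diag_check grid n m row col symbol) := by
  unfold Pre_anti_diag_check; infer_instance

def pvWitness_anti_diag_check : List (List String) × Int × Int × Int × Int × String :=
  ([["X"]], 1, 1, 0, 0, "X")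

def Spec_anti_diag_check (grid : List (List String)) (n : Int) (m : Int) (row : Int) (col : Int) (symbol : String) (out : Bool) : Prop := out = anti_diag_check_alt grid n m row col symbol
instance (grid : List (List String)) (n : Int) (m : Int) (row : Int) (col : Int) (symbol : String) (out : Bool) : Decidable (Spec_anti_diag_check grid n m row col symbol out) := by unfold Spec_anti_diag_check; infer_instance

-- ===== CLAIM (what is proved, stated in full; the proofs are below) =====
def Claim_equal_anti_diag_check : Prop := ∀ (grid : List (List String)) (n : Int) (m : Int) (row : Int) (col : Int) (symbol : String), Dom_anti_diag_check grid n m row col symbol → Pre_anti_diag_check grid n m row col symbol → Spec_anti_diag_check grid n m row col symbol (anti_diag_check grid n m row col symbol)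

-- ===== LEMMAS AND PROOFS =====

-- A's loop, abstracted to the list of cell values it compares
def loopS (m : Int) (symbol : String) : List String → Int → Bool
  | [], _ => false
  | s :: rest, count =>
    if s == symbol then
      if count + 1 == m then true
      else loopS m symbol rest (count + 1)
    else loopS m symbol rest 0

theorem adcLoop_eq_loopS (grid : List (List String)) (row col m : Int) (symbol : String)
    (L : List Int) : ∀ c : Int,
    adcLoop grid row col m symbol L c = loopS m symbol (L.map (adcCell grid row col)) c := by
  induction L with
  | nil => intro c; rfl
  | cons i rest ih =>
    intro c
    simp only [List.map_cons, adcLoop, loopS]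
    split_ifs <;> simp [ih]

theorem loopS_nonpos (m : Int) (symbol : String) (hm : m ≤ 0) :
    ∀ (seq : List String) (c : Int), 0 ≤ c → loopS m symbol seq c = false := by
  intro seq
  induction seq with
  | nil => intro c _; rfl
  | cons s rest ih =>
    intro c hc
    have hne : (c + 1 == m) = false := by
      simp only [beq_eq_false_iff_ne]; omega
    simp only [loopS, hne, Bool.false_eq_true, if_false]
    split_ifs with h
    · exact ih (c + 1) (by omega)
    · exact ih 0 (by omega)

-- "the window has m consecutive cells equal to symbol"
def Win (mN : Nat) (symbol : String) (seq : List String) : Prop :=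
  ∃ j : Nat, (seq.drop j).take mN = List.replicate mN symbol

theorem drop_repl_cons (symbol s : String) (rest : List String) (c k : Nat) :
    (List.replicate c symbol ++ s :: rest).drop (c + 1 + k) = rest.drop k := by
  rw [List.drop_append]
  rw [List.drop_eq_nil_of_le (by simp; omega)]
  simp only [List.nil_append, List.length_replicate]
  rw [show c + 1 + k - c = k + 1 by omega]
  exact List.drop_succ_cons

theorem win_cons_ne (mN : Nat) (symbol s : String) (c : Nat) (rest : List String)
    (hc : c < mN) (hs : s ≠ symbol) :
    Win mN symbol (List.replicate c symbol ++ s :: rest) ↔ Win mN symbol rest := by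
  constructor
  · rintro ⟨j, hj⟩
    by_cases hle : c + 1 ≤ j
    · refine ⟨j - (c + 1), ?_⟩
      rw [show j = c + 1 + (j - (c + 1)) by omega, drop_repl_cons] at hj
      exact hj
    · exfalso
      have hdj : (List.replicate c symbol ++ s :: rest).drop j
          = List.replicate (c - j) symbol ++ s :: rest := by
        rw [List.drop_append, List.drop_replicate]
        simp only [List.length_replicate]
        rw [show j - c = 0 by omega]
        rfl
      rw [hdj] at hj
      have hmem : s ∈ List.replicate mN symbol := by
        rw [← hj, List.take_append]
        simp only [List.length_replicate]
        obtain ⟨k, hk⟩ : ∃ k, mN - (c - j) = k + 1 := ⟨mN - (c - j) - 1, by omega⟩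
        rw [hk, List.take_succ_cons]
        simp
      exact hs (List.eq_of_mem_replicate hmem)
  · rintro ⟨j, hj⟩
    refine ⟨c + 1 + j, ?_⟩
    rw [drop_repl_cons]
    exact hj

theorem loopS_iff_win (m : Int) (symbol : String) (hm : 1 ≤ m) :
    ∀ (seq : List String) (c : Nat), (c : Int) < m →
      (loopS m symbol seq c = true ↔
        Win m.toNat symbol (List.replicate c symbol ++ seq)) := by
  intro seq
  induction seq with
  | nil =>
    intro c hc
    simp only [loopS]
    constructor
    · intro h; cases h
    · rintro ⟨j, hj⟩
      exfalso
      have hlen : ((List.replicate c symbol ++ ([] : List String)).drop j |>.take m.toNat).length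
          = m.toNat := by rw [hj]; simp
      simp only [List.append_nil, List.length_take, List.length_drop,
        List.length_replicate] at hlen
      omega
  | cons s rest ih =>
    intro c hc
    simp only [loopS]
    by_cases hs : s == symbol
    · have hseq : s = symbol := eq_of_beq hs
      rw [hs, if_pos rfl]
      have hfold : List.replicate c symbol ++ s :: rest
          = List.replicate (c + 1) symbol ++ rest := by
        rw [hseq, List.replicate_succ' (n := c)]
        simp
      by_cases hcm : (c : Int) + 1 = m
      · have : ((c : Int) + 1 == m) = true := by simpa using hcm
        rw [this, if_pos rfl]
        simp only [true_iff]
        refine ⟨0, ?_⟩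
        rw [List.drop_zero, hfold]
        have hcm' : c + 1 = m.toNat := by omega
        rw [← hcm']
        rw [List.take_append_of_le_length (by simp)]
        simp [List.take_replicate]
      · have : ((c : Int) + 1 == m) = false := by simpa using hcm
        rw [this]
        simp only [Bool.false_eq_true, if_false]
        have hlt : ((c + 1 : Nat) : Int) < m := by push_cast; omega
        have := ih (c + 1) hlt
        rw [show ((c : Int) + 1) = (((c + 1 : Nat)) : Int) by push_cast; ring]
        rw [this, hfold]
    · have hs' : (s == symbol) = false := by simpa using hs
      rw [hs']
      simp only [Bool.false_eq_true, if_false]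
      have := ih 0 (by omega)
      simp only [List.replicate_zero, List.nil_append, Nat.cast_zero] at this
      rw [this]
      exact (win_cons_ne m.toNat symbol s c rest (by omega)
        (by simpa using hs)).symm

-- B's sliding-window test is Win
theorem alt_any_iff_win (seq : List String) (m : Int) (symbol : String) (hm : 1 ≤ m) :
    ((PySem.List.pyRange 0 ((seq.length : Int) - m + 1) 1).any
        (fun j => (PySem.List.slice seq (some j) (some (j + m))).all (fun c => c == symbol)))
      = true ↔ Win m.toNat symbol seq := by
  rw [List.any_eq_true]
  constructor
  · rintro ⟨j, hjmem, hj⟩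
    rw [PySem.List.mem_pyRange_one] at hjmem
    obtain ⟨hj0, hjlt⟩ := hjmem
    rw [PySem.List.slice_toNat seq hj0 (by omega)] at hj
    have htn : (j + m).toNat - j.toNat = m.toNat := by omega
    rw [htn] at hj
    refine ⟨j.toNat, ?_⟩
    rw [List.eq_replicate_iff]
    rw [List.all_eq_true] at hj
    constructor
    · simp only [List.length_take, List.length_drop]
      omega
    · intro b hb
      have := hj b hb
      exact eq_of_beq this
  · rintro ⟨j, hj⟩
    have hlen : ((seq.drop j).take m.toNat).length = m.toNat := by rw [hj]; simp
    simp only [List.length_take, List.length_drop] at hlen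
    refine ⟨(j : Int), ?_, ?_⟩
    · rw [PySem.List.mem_pyRange_one]
      constructor
      · omega
      · omega
    · rw [PySem.List.slice_toNat seq (by omega) (by omega)]
      have htn : ((j : Int) + m).toNat - ((j : Int)).toNat = m.toNat := by omega
      rw [htn, Int.toNat_natCast, List.all_eq_true]
      intro b hb
      rw [hj] at hb
      have := List.eq_of_mem_replicate hb
      simp [this]

-- ===== VERDICT (by name: the statement is the Claim_ definition above) =====
theorem anti_diag_check_spec : Claim_equal_anti_diag_check := by
  intro grid n m row col symbol _ _
  unfold Spec_anti_diag_check anti_diag_check anti_diag_check_alt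
  simp only
  rw [adcLoop_eq_loopS]
  set seq := (PySem.List.pyRange
      (-(min (find_upper_bound row m n) (find_lower_bound col m)))
      ((min (find_lower_bound row m) (find_upper_bound col m n)) + 1) 1).map
      (fun i => adcCell grid row col i) with hseq
  by_cases hm : m < 1
  · rw [if_pos hm]
    exact loopS_nonpos m symbol (by omega) seq 0 le_rfl
  · rw [if_neg hm]
    replace hm : 1 ≤ m := by omega
    rw [Bool.eq_iff_iff]
    rw [alt_any_iff_win seq m symbol hm]
    have := loopS_iff_win m symbol hm seq 0 (by omega)
    simpa using this
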